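-- pv_equiv track=rewrite | github.com/tahmid-saj/data-structures-algorithms | hackerrank/algo/python/goodland_electricity.py | pylons
-- ===== SOURCE A (Python) =====
-- def pylons(k, arr):
--   count, last, limit, newPoint = 0, -1, k, -1
--
--   while last + k < len(arr):
--     newPoint = -1
--     for i in range(limit - 1, last, -1):
--       if arr[i] == 1:
--         newPoint = i
--         break
--     if newPoint == -1:
--       count = -1
--       break
--
--     last = newPoint
--     limit = min(len(arr), last + (2 * k))
--     count += 1
--
--   return count
-- ===== SOURCE B (Python) =====
-- def pylons(k, arr):
--     n = len(arr)
--     # prev[i] = rightmost index j <= i with arr[j] == 1, or -1 if none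
--     prev = [0] * n
--     lastone = -1
--     for i, x in enumerate(arr):
--         if x == 1:
--             lastone = i
--         prev[i] = lastone
--     count, last, limit = 0, -1, k
--     while last + k < n:
--         j = limit - 1
--         cand = prev[j] if j >= 0 else -1
--         if cand <= last:
--             return -1
--         last = cand
--         limit = min(n, last + 2 * k)
--         count += 1
--     return count
-- ===== Notes on version B (the rewrite author's own statement) =====
-- stated objective: alternative
-- what changed: Replaces A's per-step O(k) backwards scan for the rightmost 1 in each window by a once-precomputed rightmost-one-so-far array with O(1) lookups; worst-case cost drops from O(n*k) to O(n), though on typical inputs (where A's scan stops early) the measured times are similar.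
import Mathlib
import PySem

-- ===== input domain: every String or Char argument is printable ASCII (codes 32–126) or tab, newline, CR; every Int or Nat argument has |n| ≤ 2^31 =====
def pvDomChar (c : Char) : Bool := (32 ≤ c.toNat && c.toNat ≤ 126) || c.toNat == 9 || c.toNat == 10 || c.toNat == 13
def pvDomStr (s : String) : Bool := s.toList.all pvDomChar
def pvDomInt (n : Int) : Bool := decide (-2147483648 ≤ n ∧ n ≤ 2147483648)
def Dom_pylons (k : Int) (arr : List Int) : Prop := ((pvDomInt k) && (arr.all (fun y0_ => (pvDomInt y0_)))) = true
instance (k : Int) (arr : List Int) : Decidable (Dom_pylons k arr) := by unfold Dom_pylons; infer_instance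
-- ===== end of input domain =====

-- B replaces A's inner backwards scan per step by a once-precomputed rightmost-one array lookup (alternative algorithm); return value proved identical.

-- ===== PORT A =====
-- inner loop: for i in range(limit-1, last, -1): if arr[i] == 1: newPoint = i; break  (else -1)
-- (in every reached state 0 ≤ i < len arr, so getD matches Python's arr[i] exactly)
def pylonsScan (arr : List Int) (i last : Int) : Int :=
  if _h : last < i then
    (if arr.getD i.toNat 0 == 1 then i else pylonsScan arr (i - 1) last)
  else -1
termination_by (i - last).toNat
decreasing_by omega

-- the while loop; fuel (length arr + 2) is enough iterations because `last` strictly increases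
def pylonsLoop (arr : List Int) (k : Int) : Nat → Int → Int → Int → Int
  | 0, count, _, _ => count
  | fuel + 1, count, last, limit =>
    if last + k < (arr.length : Int) then
      let np := pylonsScan arr (limit - 1) last
      if np == -1 then -1
      else pylonsLoop arr k fuel (count + 1) np (min (arr.length : Int) (np + 2 * k))
    else count

def pylons (k : Int) (arr : List Int) : Int :=
  pylonsLoop arr k (arr.length + 2) 0 (-1) k

-- ===== PORT B =====
-- prev[i] = rightmost index j ≤ i with arr[j] == 1, or -1 (B's precomputed array)
def buildPrev (xs : List Int) (i lastone : Int) : List Int :=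
  match xs with
  | [] => []
  | x :: rest =>
    let cur := if x == 1 then i else lastone
    cur :: buildPrev rest (i + 1) cur

def pylonsAltLoop (n : Nat) (prev : List Int) (k : Int) : Nat → Int → Int → Int → Int
  | 0, count, _, _ => count
  | fuel + 1, count, last, limit =>
    if last + k < (n : Int) then
      let j := limit - 1
      let cand := if j < 0 then -1 else prev.getD j.toNat (-1)
      if cand ≤ last then -1
      else pylonsAltLoop n prev k fuel (count + 1) cand (min (n : Int) (cand + 2 * k))
    else count

def pylons_alt (k : Int) (arr : List Int) : Int :=
  pylonsAltLoop arr.length (buildPrev arr 0 (-1)) k (arr.length + 2) 0 (-1) k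

-- ===== PRECONDITION & SPEC =====
def Spec_pylons (k : Int) (arr : List Int) (out : Int) : Prop := out = pylons_alt k arr
instance (k : Int) (arr : List Int) (out : Int) : Decidable (Spec_pylons k arr out) := by unfold Spec_pylons; infer_instance

-- ===== CLAIM (what is proved, stated in full; the proofs are below) =====
def Claim_equal_pylons : Prop := ∀ (k : Int) (arr : List Int), Dom_pylons k arr → Spec_pylons k arr (pylons k arr)

-- ===== LEMMAS AND PROOFS =====

-- buildPrev entries never exceed their own index (offset by i), given the carry is below i
lemma buildPrev_le (xs : List Int) (i lastone : Int) (h : lastone < i) (j : Nat) (hj : j < xs.length) :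
    (buildPrev xs i lastone).getD j (-1) ≤ i + j := by
  induction xs generalizing i lastone j with
  | nil => simp at hj
  | cons x rest ih =>
    cases j with
    | zero => simp [buildPrev]; split <;> omega
    | succ m =>
      have h1 : (buildPrev (x :: rest) i lastone).getD (m + 1) (-1)
           = (buildPrev rest (i + 1) (if x == 1 then i else lastone)).getD m (-1) := by
        simp [buildPrev]
      rw [h1]
      have := ih (i + 1) (if x == 1 then i else lastone) (by split <;> omega) m (by simpa using hj)
      omega

-- characterisation of buildPrev: entry j is i+j if xs[j]==1, else the previous entry (carry at j = 0)
lemma buildPrev_getD (xs : List Int) (i lastone : Int) (j : Nat) (hj : j < xs.length) :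
    (buildPrev xs i lastone).getD j (-1)
      = if xs.getD j 0 == 1 then i + j
        else (if j = 0 then lastone else (buildPrev xs i lastone).getD (j - 1) (-1)) := by
  induction xs generalizing i lastone j with
  | nil => simp at hj
  | cons x rest ih =>
    cases j with
    | zero => simp [buildPrev]
    | succ m =>
      have hm : m < rest.length := by simpa using hj
      have h1 : (buildPrev (x :: rest) i lastone).getD (m + 1) (-1)
              = (buildPrev rest (i + 1) (if x == 1 then i else lastone)).getD m (-1) := by
        simp [buildPrev]
      rw [h1, ih (i + 1) (if x == 1 then i else lastone) m hm]
      cases m with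
      | zero => simp [buildPrev]
      | succ p =>
        have h2 : (buildPrev (x :: rest) i lastone).getD (p + 1) (-1)
                = (buildPrev rest (i + 1) (if x == 1 then i else lastone)).getD p (-1) := by
          simp [buildPrev]
        simp only [List.getD_cons_succ, Nat.add_sub_cancel, h2]
        by_cases hx : (rest.getD (p + 1) 0 == 1) = true
        · simp only [hx, if_pos]; push_cast; ring
        · simp only [hx, Bool.false_eq_true, if_false, Nat.succ_ne_zero]

-- A's backwards scan equals B's lookup, in the nonempty-range case
lemma scan_eq_lookup_aux (arr : List Int) : ∀ (m : Nat) (j last : Int), -1 ≤ last → last < j →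
    j < (arr.length : Int) → j.toNat = m →
    pylonsScan arr j last
      = (if (buildPrev arr 0 (-1)).getD j.toNat (-1) ≤ last then -1
         else (buildPrev arr 0 (-1)).getD j.toNat (-1)) := by
  intro m
  induction m using Nat.strong_induction_on with
  | _ m ih =>
    intro j last hl hlt hj hm
    have hj0 : 0 ≤ j := by omega
    rw [pylonsScan, dif_pos hlt]
    have hchar := buildPrev_getD arr 0 (-1) j.toNat (by omega)
    by_cases h1 : (arr.getD j.toNat 0 == 1) = true
    · have he : (buildPrev arr 0 (-1)).getD j.toNat (-1) = j := by
        rw [hchar, if_pos h1]; omega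
      rw [if_pos h1, he, if_neg (by omega : ¬ j ≤ last)]
    · rw [if_neg h1]
      by_cases hz : j = 0
      · -- then last = -1 and the recursive scan range is empty; prev[0] = -1
        have hlast : last = -1 := by omega
        rw [pylonsScan, dif_neg (by omega : ¬ last < j - 1)]
        have : (buildPrev arr 0 (-1)).getD j.toNat (-1) = -1 := by
          rw [hchar, if_neg h1, if_pos (by omega : j.toNat = 0)]
        rw [this, if_pos (by omega : (-1 : Int) ≤ last)]
      · have hstep : (buildPrev arr 0 (-1)).getD j.toNat (-1)
            = (buildPrev arr 0 (-1)).getD (j - 1).toNat (-1) := by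
          rw [hchar, if_neg h1, if_neg (by omega : ¬ j.toNat = 0)]
          congr 1; omega
        by_cases hlp : last < j - 1
        · rw [ih (j - 1).toNat (by omega) (j - 1) last hl hlp (by omega) rfl, hstep]
        · -- last = j - 1 : empty recursive range, and prev[j-1] ≤ j-1 ≤ last
          rw [pylonsScan, dif_neg (by omega : ¬ last < j - 1)]
          have hpl := buildPrev_le arr 0 (-1) (by omega) (j - 1).toNat (by omega)
          have : (buildPrev arr 0 (-1)).getD j.toNat (-1) ≤ last := by rw [hstep]; omega
          rw [if_pos this]

-- A's backwards scan equals B's lookup (all cases)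
lemma scan_eq_lookup (arr : List Int) (last j : Int) (hl : -1 ≤ last) (hj : j < (arr.length : Int)) :
    pylonsScan arr j last
      = (if j < 0 then -1
         else (if (buildPrev arr 0 (-1)).getD j.toNat (-1) ≤ last then -1
               else (buildPrev arr 0 (-1)).getD j.toNat (-1))) := by
  by_cases hle : j ≤ last
  · rw [pylonsScan, dif_neg (by omega : ¬ last < j)]
    by_cases hneg : j < 0
    · rw [if_pos hneg]
    · have hpl := buildPrev_le arr 0 (-1) (by omega) j.toNat (by omega)
      rw [if_neg hneg, if_pos (by omega : (buildPrev arr 0 (-1)).getD j.toNat (-1) ≤ last)]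
  · by_cases hneg : j < 0
    · omega
    · rw [if_neg hneg]
      exact scan_eq_lookup_aux arr j.toNat j last hl (by omega) hj rfl

-- the two loops agree from any state with last ≥ -1 and a window limit that is in range when the loop runs
lemma loop_eq (arr : List Int) (k : Int) (fuel : Nat) (count last limit : Int)
    (hl : -1 ≤ last)
    (hlim : (limit = k ∧ last = -1) ∨ limit ≤ (arr.length : Int)) :
    pylonsLoop arr k fuel count last limit
      = pylonsAltLoop arr.length (buildPrev arr 0 (-1)) k fuel count last limit := by
  induction fuel generalizing count last limit with
  | zero => rfl
  | succ fuel ih =>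
    simp only [pylonsLoop, pylonsAltLoop]
    by_cases hc : last + k < (arr.length : Int)
    · simp only [if_pos hc]
      have hlim' : limit - 1 < (arr.length : Int) := by rcases hlim with ⟨h1, h2⟩ | h <;> omega
      rw [scan_eq_lookup arr last (limit - 1) hl hlim']
      set c := (buildPrev arr 0 (-1)).getD (limit - 1).toNat (-1) with hc'
      by_cases hneg : limit - 1 < 0
      · rw [if_pos hneg, if_pos hneg, if_pos (by omega : (-1 : Int) ≤ last)]
        simp
      · rw [if_neg hneg, if_neg hneg]
        by_cases hcl : c ≤ last
        · rw [if_pos hcl, if_pos hcl]; simp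
        · rw [if_neg hcl, if_neg hcl,
            if_neg (by simp only [beq_iff_eq]; omega : ¬ ((c == -1) = true))]
          exact ih (count + 1) c (min (arr.length : Int) (c + 2 * k)) (by omega) (Or.inr (by omega))
    · simp only [if_neg hc]

-- ===== VERDICT (by name: the statement is the Claim_ definition above) =====
theorem pylons_spec : Claim_equal_pylons := by
  intro k arr _
  unfold Spec_pylons pylons pylons_alt
  exact loop_eq arr k (arr.length + 2) 0 (-1) k (by omega) (Or.inl ⟨rfl, rfl⟩)
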